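-- pv_equiv track=rewrite | github.com/david-parker-softrams/observability-assistant | src/logai/core/context/result_cache.py | _extract_time_range
-- ===== SOURCE A (Python) =====
-- from typing import Any
--
-- def _extract_time_range(events: list[dict[str, Any]]) -> dict[str, Any]:
--     """
--     Extract time range from events.
--
--     Args:
--         events: List of event dictionaries
--
--     Returns:
--         Time range dictionary with start, end, and span
--     """
--     if not events:
--         return {"start": None, "end": None}
--
--     timestamps: list[int] = []
--     for e in events:
--         ts = e.get("timestamp")
--         if ts is not None and isinstance(ts, int):
--             timestamps.append(ts)
--
--     if not timestamps:
--         return {"start": None, "end": None}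
--
--     min_ts = min(timestamps)
--     max_ts = max(timestamps)
--
--     return {
--         "start": min_ts,
--         "end": max_ts,
--         "span_ms": max_ts - min_ts,
--     }
-- ===== SOURCE B (Python) =====
-- def _extract_time_range(events):
--     """Single pass keeping running (min, max) accumulator instead of
--     building a timestamp list and scanning it twice."""
--     acc = None  # (min_ts, max_ts) or None
--     for e in events:
--         ts = e.get("timestamp")
--         if ts is not None and isinstance(ts, int):
--             if acc is None:
--                 acc = (ts, ts)
--             else:
--                 acc = (min(acc[0], ts), max(acc[1], ts))
--     if acc is None:
--         return {"start": None, "end": None}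
--     return {"start": acc[0], "end": acc[1], "span_ms": acc[1] - acc[0]}
-- ===== Notes on version B (the rewrite author's own statement) =====
-- stated objective: alternative
-- what changed: B replaces A's build-a-timestamp-list-then-min-then-max (three traversals) with one fold over events maintaining a running (min,max) accumulator and no intermediate list.
import Mathlib
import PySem

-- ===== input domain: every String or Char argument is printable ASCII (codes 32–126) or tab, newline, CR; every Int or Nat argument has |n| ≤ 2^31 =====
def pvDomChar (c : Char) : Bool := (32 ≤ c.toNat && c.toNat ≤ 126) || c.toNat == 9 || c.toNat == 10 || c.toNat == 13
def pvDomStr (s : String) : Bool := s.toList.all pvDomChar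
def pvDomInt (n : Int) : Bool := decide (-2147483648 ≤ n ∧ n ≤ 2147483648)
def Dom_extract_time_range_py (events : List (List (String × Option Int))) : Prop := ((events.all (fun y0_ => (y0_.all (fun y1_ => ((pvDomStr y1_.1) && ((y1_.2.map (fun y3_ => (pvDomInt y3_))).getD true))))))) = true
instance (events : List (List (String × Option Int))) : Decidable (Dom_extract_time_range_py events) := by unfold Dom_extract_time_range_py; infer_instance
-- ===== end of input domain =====

-- B fuses A's list-build + min + max scans into one fold with a running (min, max) accumulator.

-- ===== PORT A =====
-- A's timestamp-collecting loop
def pvATimestamps (events : List (List (String × Option Int))) : List Int :=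
  events.foldl (fun acc e =>
    match List.lookup "timestamp" e with
    | some (some t) => acc ++ [t]
    | _ => acc) []

def extract_time_range_py (events : List (List (String × Option Int))) : List (String × Option Int) :=
  if events = [] then [("start", none), ("end", none)]
  else if pvATimestamps events = [] then [("start", none), ("end", none)]
  else
    match PySem.List.min? (pvATimestamps events) (fun x => x), PySem.List.max? (pvATimestamps events) (fun x => x) with
    | some mn, some mx => [("start", some mn), ("end", some mx), ("span_ms", some (mx - mn))]
    | _, _ => [("start", none), ("end", none)]   -- unreachable: the list is nonempty

-- ===== PORT B =====
-- B's single-pass loop maintaining the running (min, max) accumulator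
def pvBAcc (events : List (List (String × Option Int))) : Option (Int × Int) :=
  events.foldl (fun acc e =>
    match List.lookup "timestamp" e with
    | some (some t) =>
      match acc with
      | none => some (t, t)
      | some (mn, mx) => some (min mn t, max mx t)
    | _ => acc) none

def extract_time_range_py_alt (events : List (List (String × Option Int))) : List (String × Option Int) :=
  match pvBAcc events with
  | none => [("start", none), ("end", none)]
  | some (mn, mx) => [("start", some mn), ("end", some mx), ("span_ms", some (mx - mn))]

-- ===== PRECONDITION & SPEC =====
def Spec_extract_time_range_py (events : List (List (String × Option Int))) (out : List (String × Option Int)) : Prop := out = extract_time_range_py_alt events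
instance (events : List (List (String × Option Int))) (out : List (String × Option Int)) : Decidable (Spec_extract_time_range_py events out) := by unfold Spec_extract_time_range_py; infer_instance

-- ===== CLAIM (what is proved, stated in full; the proofs are below) =====
def Claim_equal_extract_time_range_py : Prop := ∀ (events : List (List (String × Option Int))), Dom_extract_time_range_py events → Spec_extract_time_range_py events (extract_time_range_py events)

-- ===== LEMMAS AND PROOFS =====

-- the timestamp extracted from one event, as A and B both test it
def pvTs (e : List (String × Option Int)) : Option Int :=
  match List.lookup "timestamp" e with
  | some (some t) => some t
  | _ => none

-- A's list-building fold is append of the filterMap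
theorem pvA_fold_aux (events : List (List (String × Option Int))) (acc : List Int) :
    events.foldl (fun acc e =>
      match List.lookup "timestamp" e with
      | some (some t) => acc ++ [t]
      | _ => acc) acc = acc ++ events.filterMap pvTs := by
  induction events generalizing acc with
  | nil => simp
  | cons e tl ih =>
    simp only [List.foldl_cons, List.filterMap_cons, pvTs]
    cases h : List.lookup "timestamp" e with
    | none => simpa [h] using ih acc
    | some v =>
      cases v with
      | none => simpa [h] using ih acc
      | some t => rw [ih]; simp [pvTs]

-- B's fold factors through the same filterMap
def pvStep (acc : Option (Int × Int)) (t : Int) : Option (Int × Int) :=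
  match acc with
  | none => some (t, t)
  | some (mn, mx) => some (min mn t, max mx t)

theorem pvB_fold_aux (events : List (List (String × Option Int))) (acc : Option (Int × Int)) :
    events.foldl (fun acc e =>
      match List.lookup "timestamp" e with
      | some (some t) =>
        match acc with
        | none => some (t, t)
        | some (mn, mx) => some (min mn t, max mx t)
      | _ => acc) acc = (events.filterMap pvTs).foldl pvStep acc := by
  induction events generalizing acc with
  | nil => simp
  | cons e tl ih =>
    simp only [List.foldl_cons, List.filterMap_cons, pvTs]
    cases h : List.lookup "timestamp" e with
    | none => simpa [h] using ih acc
    | some v =>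
      cases v with
      | none => simpa [h] using ih acc
      | some t => rw [ih]; simp [pvTs, pvStep]

theorem pvA_fold (events : List (List (String × Option Int))) :
    pvATimestamps events = events.filterMap pvTs := by
  simpa using pvA_fold_aux events []

theorem pvB_fold (events : List (List (String × Option Int))) :
    pvBAcc events = (events.filterMap pvTs).foldl pvStep none := by
  simpa using pvB_fold_aux events none

-- running (min,max) fold over a concrete list
theorem pvStep_some (L : List Int) (mn mx : Int) :
    L.foldl pvStep (some (mn, mx)) = some (L.foldl min mn, L.foldl max mx) := by
  induction L generalizing mn mx with
  | nil => rfl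
  | cons t tl ih => simp [pvStep, ih]

theorem pvStep_spec (L : List Int) :
    L.foldl pvStep none =
      match L with
      | [] => none
      | h :: t => some (t.foldl min h, t.foldl max h) := by
  cases L with
  | nil => rfl
  | cons h t => simp [pvStep, pvStep_some]

theorem extract_eq (events : List (List (String × Option Int))) :
    extract_time_range_py events = extract_time_range_py_alt events := by
  unfold extract_time_range_py extract_time_range_py_alt
  rw [pvA_fold, pvB_fold, pvStep_spec]
  cases hL : events.filterMap pvTs with
  | nil => cases events <;> simp
  | cons h t =>
    have hne : events ≠ [] := by
      intro he; rw [he] at hL; simp at hL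
    rw [PySem.List.min?_id_cons, PySem.List.max?_id_cons]
    simp [hne]

-- ===== VERDICT (by name: the statement is the Claim_ definition above) =====
theorem extract_time_range_py_spec : Claim_equal_extract_time_range_py := by
  intro events _
  exact (extract_eq events).symm ▸ rfl
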